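-- pv_equiv track=rewrite | github.com/ethan-kisiel/py-async-event-scheduler | scheduler.py | days_until
-- ===== SOURCE A (Python) =====
-- def days_until(start_day: int, end_day: int):
--     """
--     walks thru days of the week to get the days
--     until event day
--     """
--
--     days_otw = [0, 1, 2, 3, 4, 5, 6]
--     days = 0
--     current_index = days_otw.index(start_day)
--
--     while current_index != days_otw.index(end_day):
--         days += 1
--         current_index += 1
--         if current_index >= len(days_otw):
--             current_index = 0
--
--     return days
-- ===== SOURCE B (Python) =====
-- def days_until(start_day: int, end_day: int):
--     """Days until event day: closed-form modular difference of the weekday indices."""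
--     days_otw = [0, 1, 2, 3, 4, 5, 6]
--     return (days_otw.index(end_day) - days_otw.index(start_day)) % 7
-- ===== Notes on version B (the rewrite author's own statement) =====
-- stated objective: simpler
-- what changed: Replaces the day-by-day while loop with the closed form (index(end_day) - index(start_day)) % 7, keeping the .index lookups that validate both arguments.
import Mathlib
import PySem

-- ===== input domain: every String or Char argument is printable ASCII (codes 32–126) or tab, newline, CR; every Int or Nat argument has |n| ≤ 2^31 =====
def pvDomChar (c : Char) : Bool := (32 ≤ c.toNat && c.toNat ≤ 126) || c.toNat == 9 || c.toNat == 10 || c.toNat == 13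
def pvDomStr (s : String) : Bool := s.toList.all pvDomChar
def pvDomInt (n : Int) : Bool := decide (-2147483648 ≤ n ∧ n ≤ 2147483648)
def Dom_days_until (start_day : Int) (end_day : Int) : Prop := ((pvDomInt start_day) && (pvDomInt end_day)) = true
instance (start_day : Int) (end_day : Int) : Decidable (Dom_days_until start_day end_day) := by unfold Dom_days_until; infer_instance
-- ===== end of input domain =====

-- B replaces A's day-by-day while loop with the closed form (index(end) - index(start)) % 7 (objective: simpler).

-- ===== PORT A =====
def pvWeekA : List Int := [0, 1, 2, 3, 4, 5, 6]

-- A's while loop; the loop condition re-evaluates days_otw.index(end_day), which is endIdx here.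
-- fuel = 7 bounds the recursion; inside Pre_ the Python loop makes at most 6 iterations, so the bound is never hit.
def pvLoopA (endIdx : Nat) (cur : Nat) (days : Int) : Nat → Int
  | 0 => days
  | fuel + 1 =>
    if cur ≠ endIdx then
      let cur' := cur + 1
      pvLoopA endIdx (if cur' ≥ pvWeekA.length then 0 else cur') (days + 1) fuel
    else days

def days_until (start_day : Int) (end_day : Int) : Int :=
  match PySem.List.index? pvWeekA start_day, PySem.List.index? pvWeekA end_day with
  | some si, some ei => pvLoopA ei si 0 7
  | _, _ => 0  -- ValueError: excluded by Pre_days_until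

-- ===== PORT B =====
def pvWeekB : List Int := [0, 1, 2, 3, 4, 5, 6]
def days_until_alt (start_day : Int) (end_day : Int) : Int :=
  match PySem.List.index? pvWeekB end_day with
  | none => 0  -- ValueError: excluded by Pre_days_until
  | some ei =>
    match PySem.List.index? pvWeekB start_day with
    | none => 0  -- ValueError: excluded by Pre_days_until
    | some si => PySem.Int.mod ((ei : Int) - (si : Int)) 7

-- ===== PRECONDITION & SPEC =====
-- Pre_ excludes exactly the inputs on which the Python A raises ValueError (a day outside 0..6).
def Pre_days_until (start_day : Int) (end_day : Int) : Prop :=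
  (0 ≤ start_day ∧ start_day ≤ 6) ∧ (0 ≤ end_day ∧ end_day ≤ 6)
instance (start_day : Int) (end_day : Int) : Decidable (Pre_days_until start_day end_day) := by
  unfold Pre_days_until; infer_instance
def pvWitness_days_until : Int × Int := (1, 5)

def Spec_days_until (start_day : Int) (end_day : Int) (out : Int) : Prop := out = days_until_alt start_day end_day
instance (start_day : Int) (end_day : Int) (out : Int) : Decidable (Spec_days_until start_day end_day out) := by unfold Spec_days_until; infer_instance

-- ===== CLAIM (what is proved, stated in full; the proofs are below) =====
def Claim_equal_days_until : Prop := ∀ (start_day : Int) (end_day : Int), Dom_days_until start_day end_day → Pre_days_until start_day end_day → Spec_days_until start_day end_day (days_until start_day end_day)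

-- ===== LEMMAS AND PROOFS =====

-- ===== VERDICT (by name: the statement is the Claim_ definition above) =====
theorem days_until_spec : Claim_equal_days_until := by
  intro s e _ hpre
  obtain ⟨⟨hs0, hs6⟩, ⟨he0, he6⟩⟩ := hpre
  unfold Spec_days_until
  interval_cases s <;> interval_cases e <;> decide
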